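-- pv_equiv track=rewrite | github.com/hlammiv/z2_matter_qc | simulation_main/modules/Z2analysis.py | net_charge
-- ===== SOURCE A (Python) =====
-- def net_charge(state : str):
--     # initialize to zero
--     Qnet = 0
--
--     # loop through even sites
--     for s in state[0::4]:
--         if (s == '1'):
--             Qnet += 1
--
--     for s in state[2::4]:
--         if (s == '1'):
--             Qnet += -1
--
--     return Qnet
-- ===== SOURCE B (Python) =====
-- def net_charge(state: str):
--     Qnet = 0
--     for i, s in enumerate(state):
--         if s == '1':
--             if i % 4 == 0:
--                 Qnet += 1
--             elif i % 4 == 2: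
--                 Qnet -= 1
--     return Qnet
-- ===== Notes on version B (the rewrite author's own statement) =====
-- stated objective: alternative
-- what changed: Replaces the two strided-slice passes (state[0::4], state[2::4]) by a single enumerate pass that adds 1 at indices i%4==0 and subtracts 1 at i%4==2 for characters equal to '1'.
import Mathlib
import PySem

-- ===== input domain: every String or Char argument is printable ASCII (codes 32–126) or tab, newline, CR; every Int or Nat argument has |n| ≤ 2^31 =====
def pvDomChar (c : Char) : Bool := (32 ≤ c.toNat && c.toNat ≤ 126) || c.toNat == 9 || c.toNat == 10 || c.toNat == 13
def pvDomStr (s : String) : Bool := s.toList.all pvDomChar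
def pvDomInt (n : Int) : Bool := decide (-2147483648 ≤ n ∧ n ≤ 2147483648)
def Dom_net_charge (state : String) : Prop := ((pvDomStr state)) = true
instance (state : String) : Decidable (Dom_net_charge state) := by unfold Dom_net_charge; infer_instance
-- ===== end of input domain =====

-- B replaces the two strided-slice passes by one enumerate pass keyed on i % 4; same cost, different traversal.

-- ===== PORT A =====
-- state[0::4] / state[2::4] are the strided slices; each 'for s in …' is a foldl over that slice.
def net_charge (state : String) : Int :=
  let q1 := ((PySem.List.slice? state.toList (some 0) none 4).getD []).foldl
    (fun q s => if s == '1' then q + 1 else q) 0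
  ((PySem.List.slice? state.toList (some 2) none 4).getD []).foldl
    (fun q s => if s == '1' then q + (-1) else q) q1

-- ===== PORT B =====
-- single pass: for i, s in enumerate(state), +1 at i%4==0, -1 at i%4==2 when s=='1'
def net_charge_alt (state : String) : Int :=
  (PySem.List.enumerate state.toList).foldl
    (fun q p => if p.2 == '1' then
        (if PySem.Int.mod p.1 4 = 0 then q + 1
         else if PySem.Int.mod p.1 4 = 2 then q - 1
         else q)
      else q) 0

-- ===== PRECONDITION & SPEC =====
def Spec_net_charge (state : String) (out : Int) : Prop := out = net_charge_alt state
instance (state : String) (out : Int) : Decidable (Spec_net_charge state out) := by unfold Spec_net_charge; infer_instance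

-- ===== CLAIM (what is proved, stated in full; the proofs are below) =====
def Claim_equal_net_charge : Prop := ∀ (state : String), Dom_net_charge state → Spec_net_charge state (net_charge state)

-- ===== LEMMAS AND PROOFS =====

-- elements of l at indices 0, 4, 8, … (what slice [ ::4] selects)
def every4 {α : Type} : List α → List α
  | [] => []
  | x :: r => x :: every4 (r.drop 3)
termination_by l => l.length
decreasing_by simp

theorem filterMap_stride4 {α : Type} (t : List α) :
    List.filterMap (fun (k : ℕ) => t[((4:ℤ) * (k:ℤ)).toNat]?) (List.range ((t.length + 3) / 4)) = every4 t := by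
  induction t using every4.induct with
  | case1 => simp [every4]
  | case2 x r ih =>
    have hlen : (r.length + 1 + 3) / 4 = r.length / 4 + 1 := by omega
    rw [List.length_cons, hlen, List.range_succ_eq_map, List.filterMap_cons]
    have h0 : ((x :: r)[((4:ℤ) * ((0:ℕ):ℤ)).toNat]?) = some x := by norm_num
    rw [h0, List.filterMap_map]
    have hstep : ∀ k : ℕ, (x :: r)[((4:ℤ) * ((Nat.succ k : ℕ):ℤ)).toNat]? = (r.drop 3)[((4:ℤ) * ((k:ℕ):ℤ)).toNat]? := by
      intro k
      have h1 : ((4:ℤ) * ((Nat.succ k:ℕ):ℤ)).toNat = 1 + (3 + ((4:ℤ) * ((k:ℕ):ℤ)).toNat) := by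
        push_cast; omega
      rw [h1, ← List.getElem?_drop, List.drop_one, List.tail_cons, ← List.getElem?_drop]
    have hcnt : r.length / 4 = ((r.drop 3).length + 3) / 4 := by simp; omega
    have hfe : (fun (k:ℕ) => (x :: r)[((4:ℤ) * ((Nat.succ k : ℕ):ℤ)).toNat]?) = (fun (k:ℕ) => (r.drop 3)[((4:ℤ) * ((k:ℕ):ℤ)).toNat]?) := funext hstep
    rw [show (Nat.succ : ℕ → ℕ) = fun k => Nat.succ k from rfl] at *
    simp only [Function.comp] at *
    rw [hfe, hcnt, ih, every4]

theorem slice4 {α : Type} (l : List α) (s : ℕ) :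
    PySem.List.slice? l (some (s:ℤ)) none 4 = some (every4 (l.drop s)) := by
  simp only [PySem.List.slice?, PySem.List.sliceIndices]
  norm_num
  have hmin : (min (s:ℤ) (l.length:ℤ)) = ((min s l.length : ℕ) : ℤ) := by push_cast; omega
  rw [hmin]
  set m := min s l.length with hm
  have hdrop : l.drop m = l.drop s := by
    rcases le_total s l.length with h | h
    · simp [hm, min_eq_left h]
    · rw [List.drop_eq_nil_of_le h, List.drop_eq_nil_of_le]; omega
  have hcnt : (if ((m:ℤ)) < (l.length:ℤ) then ((((l.length:ℤ)) - (m:ℤ) + 4 - 1) / 4).toNat else 0)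
      = ((l.drop m).length + 3) / 4 := by
    simp only [List.length_drop]
    split
    · next h => omega
    · next h => omega
  rw [if_neg (by omega : ¬ ((s:ℤ) < 0))]
  rw [hcnt]
  have hfun : (fun (k:ℕ) => l[((m:ℤ) + 4 * (k:ℤ)).toNat]?) = (fun (k:ℕ) => (l.drop m)[((4:ℤ) * (k:ℤ)).toNat]?) := by
    funext k
    rw [List.getElem?_drop]
    have h4 : ((m:ℤ) + 4 * (k:ℤ)).toNat = m + ((4:ℤ) * (k:ℤ)).toNat := by omega
    rw [h4]
  rw [hfun, hdrop, filterMap_stride4 (l.drop s)]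

-- the common value: (+1 per '1' at indices ≡0 mod 4) − (1 per '1' at indices ≡2 mod 4)
def chunk4 {α : Type} : List α → Unit
  | [] => ()
  | [_] => ()
  | [_, _] => ()
  | [_, _, _] => ()
  | _ :: _ :: _ :: _ :: r => chunk4 r
termination_by l => l.length
decreasing_by simp; omega

def netVal (l : List Char) : Int :=
  ((every4 l).countP (· == '1') : Int) - ((every4 (l.drop 2)).countP (· == '1') : Int)

theorem foldl_minus_count (l : List Char) (a : Int) :
    l.foldl (fun q s => if s == '1' then q + (-1) else q) a
      = a - (l.countP (· == '1') : Int) := by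
  induction l generalizing a with
  | nil => simp
  | cons x r ih =>
    by_cases h : x == '1'
    · rw [List.foldl_cons, if_pos h, ih, List.countP_cons, if_pos h]; push_cast; ring
    · rw [List.foldl_cons, if_neg h, ih, List.countP_cons, if_neg h]; simp

theorem enum_fold (l : List Char) (j : ℕ) (q : Int) :
    (PySem.List.enumerate l (4 * (j:ℤ))).foldl
      (fun q p => if p.2 == '1' then
          (if PySem.Int.mod p.1 4 = 0 then q + 1
           else if PySem.Int.mod p.1 4 = 2 then q - 1
           else q)
        else q) q = q + netVal l := by
  induction l using chunk4.induct generalizing j q with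
  | case1 => simp [PySem.List.enumerate, netVal, every4]
  | case2 a =>
    by_cases h : a = '1' <;>
      simp [PySem.List.enumerate, netVal, every4, h]
  | case3 a b =>
    have e1 : (4 * (j:ℤ) + 1) % 4 = 1 := by omega
    by_cases ha : a = '1' <;> by_cases hb : b = '1' <;>
      simp [PySem.List.enumerate, netVal, every4, e1, ha, hb]
  | case4 a b c =>
    have e1 : (4 * (j:ℤ) + 1) % 4 = 1 := by omega
    have e2 : (4 * (j:ℤ) + 1 + 1) % 4 = 2 := by omega
    by_cases ha : a = '1' <;> by_cases hb : b = '1' <;> by_cases hc : c = '1' <;>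
      simp [PySem.List.enumerate, netVal, every4, e1, e2, ha, hb, hc] <;> omega
  | case5 a b c d r ih =>
    have e0 : (4 * (j:ℤ)) % 4 = 0 := by omega
    have e1 : (4 * (j:ℤ) + 1) % 4 = 1 := by omega
    have e2 : (4 * (j:ℤ) + 1 + 1) % 4 = 2 := by omega
    have e3 : (4 * (j:ℤ) + 1 + 1 + 1) % 4 = 3 := by omega
    have e4 : (4 * (j:ℤ) + 1 + 1 + 1 + 1) = 4 * ((j+1 : ℕ):ℤ) := by push_cast; ring
    have hN : netVal (a :: b :: c :: d :: r)
        = ((if a = '1' then (1:ℤ) else 0) - (if c = '1' then (1:ℤ) else 0)) + netVal r := by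
      by_cases ha : a = '1' <;> by_cases hc : c = '1' <;>
        simp [netVal, every4, ha, hc] <;> ring
    rw [hN]
    simp only [PySem.List.enumerate, List.foldl_cons]
    rw [e4, ih]
    by_cases ha : a = '1' <;> by_cases hb : b = '1' <;> by_cases hc : c = '1' <;> by_cases hd : d = '1' <;>
      simp [e0, e1, e2, e3, ha, hb, hc, hd] <;> omega

-- ===== VERDICT (by name: the statement is the Claim_ definition above) =====
theorem net_charge_spec : Claim_equal_net_charge := by
  intro state _
  unfold Spec_net_charge net_charge net_charge_alt
  have hs0 : PySem.List.slice? state.toList (some 0) none 4 = some (every4 state.toList) := by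
    simpa using slice4 state.toList 0
  have hs2 : PySem.List.slice? state.toList (some 2) none 4 = some (every4 (state.toList.drop 2)) := by
    simpa using slice4 state.toList 2
  rw [hs0, hs2]
  simp only [Option.getD_some]
  rw [PySem.List.foldl_count_if (· == '1') (every4 state.toList) 0, foldl_minus_count]
  have hB := enum_fold state.toList 0 0
  simp only [Nat.cast_zero, mul_zero, zero_add] at hB
  rw [hB, netVal]
  ring
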